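-- pv_equiv track=rewrite | github.com/trungtranquoc/Computer-Network-Project-1---Torrent-Application | utils/threads/DownloadTask.py | _assign_piece_distribution_to_seeders
-- ===== SOURCE A (Python) =====
-- from typing import Tuple, List, Dict
--
-- def _assign_piece_distribution_to_seeders(total_piece: int, seeders_count: int) -> List[Tuple[int, int]]:
--     pieces_distribution = []
--     if seeders_count > 0:
--         base_pieces_per_seeder = total_piece // seeders_count  # Integer division
--         extra_pieces = total_piece % seeders_count  # Remainder pieces to be distributed
--
--         temp_start = 0
--         for i in range(seeders_count):
--             piece_for_this_seeder = base_pieces_per_seeder + (1 if i < extra_pieces else 0)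
--             pieces_distribution.append((temp_start, temp_start + piece_for_this_seeder))
--             temp_start += piece_for_this_seeder
--
--     return  pieces_distribution
-- ===== SOURCE B (Python) =====
-- def _assign_piece_distribution_to_seeders(total_piece: int, seeders_count: int):
--     if seeders_count <= 0:
--         return []
--     base, extra = divmod(total_piece, seeders_count)
--     return [(i * base + min(i, extra), (i + 1) * base + min(i + 1, extra))
--             for i in range(seeders_count)]
-- ===== Notes on version B (the rewrite author's own statement) =====
-- stated objective: alternative
-- what changed: Replaced the sequential temp_start accumulator with independent closed-form index arithmetic (start_i = i*base + min(i, extra)) emitted by a list comprehension.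
import Mathlib
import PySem

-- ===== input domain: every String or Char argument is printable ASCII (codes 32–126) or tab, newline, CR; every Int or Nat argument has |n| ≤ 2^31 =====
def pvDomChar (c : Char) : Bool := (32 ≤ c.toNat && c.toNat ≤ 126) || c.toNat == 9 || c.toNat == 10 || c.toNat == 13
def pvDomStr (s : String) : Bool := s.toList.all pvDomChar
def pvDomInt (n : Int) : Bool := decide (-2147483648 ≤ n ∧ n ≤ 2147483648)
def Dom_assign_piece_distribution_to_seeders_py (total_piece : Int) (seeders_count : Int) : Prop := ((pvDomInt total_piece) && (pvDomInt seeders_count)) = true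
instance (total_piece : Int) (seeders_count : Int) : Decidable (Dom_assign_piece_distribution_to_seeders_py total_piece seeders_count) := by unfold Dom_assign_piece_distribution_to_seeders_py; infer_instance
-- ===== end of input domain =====

-- B replaces A's sequential temp_start accumulator by independent closed-form index arithmetic; same cost, alternative decomposition.

-- ===== PORT A =====
def assign_piece_distribution_to_seeders_py (total_piece : Int) (seeders_count : Int) : List (Int × Int) :=
  if seeders_count > 0 then
    let base := PySem.Int.floordiv total_piece seeders_count
    let extra := PySem.Int.mod total_piece seeders_count
    let st := (PySem.List.pyRange 0 seeders_count 1).foldl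
      (fun (st : List (Int × Int) × Int) i =>
        let piece := base + (if i < extra then 1 else 0)
        (st.1 ++ [(st.2, st.2 + piece)], st.2 + piece))
      ([], 0)
    st.1
  else []

-- ===== PORT B =====
def assign_piece_distribution_to_seeders_py_alt (total_piece : Int) (seeders_count : Int) : List (Int × Int) :=
  if seeders_count ≤ 0 then []
  else
    let base := PySem.Int.floordiv total_piece seeders_count
    let extra := PySem.Int.mod total_piece seeders_count
    (PySem.List.pyRange 0 seeders_count 1).map
      (fun i => (i * base + min i extra, (i + 1) * base + min (i + 1) extra))

-- ===== PRECONDITION & SPEC =====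
def Spec_assign_piece_distribution_to_seeders_py (total_piece : Int) (seeders_count : Int) (out : List (Int × Int)) : Prop := out = assign_piece_distribution_to_seeders_py_alt total_piece seeders_count
instance (total_piece : Int) (seeders_count : Int) (out : List (Int × Int)) : Decidable (Spec_assign_piece_distribution_to_seeders_py total_piece seeders_count out) := by unfold Spec_assign_piece_distribution_to_seeders_py; infer_instance

-- ===== CLAIM (what is proved, stated in full; the proofs are below) =====
def Claim_equal_assign_piece_distribution_to_seeders_py : Prop := ∀ (total_piece : Int) (seeders_count : Int), Dom_assign_piece_distribution_to_seeders_py total_piece seeders_count → Spec_assign_piece_distribution_to_seeders_py total_piece seeders_count (assign_piece_distribution_to_seeders_py total_piece seeders_count)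

-- ===== LEMMAS AND PROOFS =====

-- A's fold over range(0, n) with the running accumulator equals B's closed form,
-- with the final temp_start being n*base + min n extra.
theorem pv_fold_closed (base extra : Int) (hextra : 0 ≤ extra) (n : Nat) :
    (PySem.List.pyRange 0 (n : Int) 1).foldl
      (fun (st : List (Int × Int) × Int) i =>
        let piece := base + (if i < extra then 1 else 0)
        (st.1 ++ [(st.2, st.2 + piece)], st.2 + piece))
      ([], 0)
    = ((PySem.List.pyRange 0 (n : Int) 1).map
        (fun i => (i * base + min i extra, (i + 1) * base + min (i + 1) extra)),
       (n : Int) * base + min (n : Int) extra) := by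
  induction n with
  | zero => simp [PySem.List.pyRange_one_eq_nil]; omega
  | succ m ih =>
    have h1 : ((m : Int) + 1) = ((m + 1 : Nat) : Int) := by push_cast; ring
    rw [← h1, PySem.List.pyRange_one_succ_right (by positivity), List.foldl_append,
      List.map_append, ih]
    simp only [List.foldl_cons, List.foldl_nil, List.map_cons, List.map_nil]
    have hmin : min ((m : Int) + 1) extra = min (m : Int) extra + (if (m : Int) < extra then 1 else 0) := by
      split_ifs with h <;> omega
    rw [Prod.mk.injEq]
    refine ⟨?_, by rw [hmin]; ring⟩
    congr 3
    rw [hmin]; ring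

theorem pv_main (total_piece seeders_count : Int) :
    assign_piece_distribution_to_seeders_py total_piece seeders_count
    = assign_piece_distribution_to_seeders_py_alt total_piece seeders_count := by
  unfold assign_piece_distribution_to_seeders_py assign_piece_distribution_to_seeders_py_alt
  by_cases hs : seeders_count > 0
  · have hle : ¬ seeders_count ≤ 0 := by omega
    simp only [hs, if_true, hle, if_false]
    obtain ⟨n, hn⟩ : ∃ n : Nat, seeders_count = (n : Int) :=
      ⟨seeders_count.toNat, by omega⟩
    subst hn
    have hextra : 0 ≤ PySem.Int.mod total_piece (n : Int) := by
      rw [PySem.Int.mod_eq_emod_of_pos hs]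
      exact Int.emod_nonneg _ (by omega)
    rw [pv_fold_closed _ _ hextra]
  · have hle : seeders_count ≤ 0 := by omega
    simp [hs, hle]

-- ===== VERDICT (by name: the statement is the Claim_ definition above) =====
theorem assign_piece_distribution_to_seeders_py_spec : Claim_equal_assign_piece_distribution_to_seeders_py := by
  intro t s _
  exact pv_main t s
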